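-- pv_equiv track=rewrite | github.com/DimethylSulfoxide/y86-64_assembler | y86asblr.py | after_process
-- ===== SOURCE A (Python) =====
-- def after_process(hexcodes: list) -> list:
--     res = []
--     i = 0
--     while i < len(hexcodes):
--         if hexcodes[i] == '10':
--             j = i
--             while j < len(hexcodes) and hexcodes[j] == '10':
--                 j += 1
--             num = j - i
--             for i in range(num // 16):
--                 res.append('10'*16)
--             res.append('10'*(num % 16))
--             i = j
--         else:
--             res.append(hexcodes[i])
--             i += 1
--     return res
-- ===== SOURCE B (Python) =====
-- def after_process(hexcodes: list) -> list:
--     # Two-phase: build a run-length encoding in one pass, then emit per run.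
--     runs = []
--     for x in hexcodes:
--         if runs and runs[-1][0] == x:
--             runs[-1][1] += 1
--         else:
--             runs.append([x, 1])
--     res = []
--     for x, n in runs:
--         if x == '10':
--             res.extend(['10' * 16] * (n // 16))
--             res.append('10' * (n % 16))
--         else:
--             res.extend([x] * n)
--     return res
-- ===== Notes on version B (the rewrite author's own statement) =====
-- stated objective: alternative
-- what changed: Replaces A's index-based nested while loops with a two-phase pass: first build a run-length encoding of the whole input, then emit each run at once ('10'-runs as 16-chunks plus remainder, other runs as repeated elements).
import Mathlib
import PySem

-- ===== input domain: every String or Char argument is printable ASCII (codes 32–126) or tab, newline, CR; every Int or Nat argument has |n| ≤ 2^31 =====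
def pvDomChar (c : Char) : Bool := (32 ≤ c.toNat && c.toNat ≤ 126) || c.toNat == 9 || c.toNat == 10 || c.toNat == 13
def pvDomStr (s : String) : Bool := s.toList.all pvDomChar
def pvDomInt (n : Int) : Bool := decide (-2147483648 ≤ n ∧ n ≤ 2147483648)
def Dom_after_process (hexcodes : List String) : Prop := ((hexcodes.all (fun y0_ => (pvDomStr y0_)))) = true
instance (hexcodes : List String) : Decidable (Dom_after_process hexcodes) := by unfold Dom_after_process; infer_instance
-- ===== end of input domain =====

-- B replaces A's index-based nested while loops by a two-phase pass (run-length encode, then emit per run); objective: alternative, same cost.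

-- '10' * k  (Python string repetition)
def tens (k : Nat) : String := String.ofList (List.flatten (List.replicate k ['1', '0']))

-- ===== PORT A =====
-- inner while loop of A: length of the leading run of '10' in the suffix
def count10 : List String → Nat
  | [] => 0
  | y :: ys => if y = "10" then count10 ys + 1 else 0

theorem count10_pos (x : String) (xs : List String) (h : x = "10") :
    1 ≤ count10 (x :: xs) := by simp [count10, h]

-- A's outer while loop over the suffix starting at index i
def after_process (hexcodes : List String) : List String :=
  match hexcodes with
  | [] => []
  | x :: xs =>
    if h : x = "10" then
      let num := count10 (x :: xs)
      List.replicate (num / 16) (tens 16) ++ [tens (num % 16)] ++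
        after_process (List.drop num (x :: xs))
    else
      x :: after_process xs
termination_by hexcodes.length
decreasing_by
  · have h1 := count10_pos x xs h
    have := List.length_drop (l := x :: xs) (i := count10 (x :: xs))
    simp only [this, List.length_cons]
    omega
  · simp

-- ===== PORT B =====
-- first loop body of Source B: extend the last run or start a new one
def rleStep (runs : List (String × Nat)) (x : String) : List (String × Nat) :=
  match runs.getLast? with
  | some (y, n) => if y = x then runs.dropLast ++ [(y, n + 1)] else runs ++ [(x, 1)]
  | none => [(x, 1)]

-- second loop body of Source B: emit one run
def emitStep (res : List String) (p : String × Nat) : List String :=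
  if p.1 = "10" then
    (res ++ List.replicate (p.2 / 16) (tens 16)) ++ [tens (p.2 % 16)]
  else
    res ++ List.replicate p.2 p.1

def after_process_alt (hexcodes : List String) : List String :=
  let runs := hexcodes.foldl rleStep []
  runs.foldl emitStep []

-- ===== PRECONDITION & SPEC =====
def Spec_after_process (hexcodes : List String) (out : List String) : Prop := out = after_process_alt hexcodes
instance (hexcodes : List String) (out : List String) : Decidable (Spec_after_process hexcodes out) := by unfold Spec_after_process; infer_instance

-- ===== CLAIM (what is proved, stated in full; the proofs are below) =====
def Claim_equal_after_process : Prop := ∀ (hexcodes : List String), Dom_after_process hexcodes → Spec_after_process hexcodes (after_process hexcodes)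

-- ===== LEMMAS AND PROOFS =====

-- canonical run-length encoding (proof-side characterisation of B's first loop)
def rleFrom (x : String) (n : Nat) : List String → List (String × Nat)
  | [] => [(x, n)]
  | y :: ys => if y = x then rleFrom x (n + 1) ys else (x, n) :: rleFrom y 1 ys

def rleCanon : List String → List (String × Nat)
  | [] => []
  | y :: ys => rleFrom y 1 ys

-- length of the leading run of x
def countEq (x : String) : List String → Nat
  | [] => 0
  | y :: ys => if y = x then countEq x ys + 1 else 0

def chunk (p : String × Nat) : List String :=
  if p.1 = "10" then List.replicate (p.2 / 16) (tens 16) ++ [tens (p.2 % 16)]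
  else List.replicate p.2 p.1

theorem foldl_rleStep (l : List String) : ∀ (acc : List (String × Nat)) (x : String) (n : Nat),
    List.foldl rleStep (acc ++ [(x, n)]) l = acc ++ rleFrom x n l := by
  induction l with
  | nil => intro acc x n; simp [rleFrom]
  | cons y ys ih =>
    intro acc x n
    simp only [List.foldl_cons, rleFrom]
    have hstep : rleStep (acc ++ [(x, n)]) y =
        if y = x then acc ++ [(x, n + 1)] else (acc ++ [(x, n)]) ++ [(y, 1)] := by
      simp only [rleStep, List.getLast?_concat, List.dropLast_concat]
      by_cases h : x = y
      · simp [h]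
      · have : ¬ y = x := fun hh => h hh.symm
        simp [h, this]
    rw [hstep]
    by_cases h : y = x
    · simp only [h]
      exact ih acc x (n + 1)
    · simp only [if_neg h]
      rw [List.append_assoc] at *
      have := ih (acc ++ [(x, n)]) y 1
      simpa using this

theorem foldl_rleStep_nil (l : List String) : List.foldl rleStep [] l = rleCanon l := by
  cases l with
  | nil => rfl
  | cons x xs =>
    have : List.foldl rleStep ([] ++ [(x, 1)]) xs = [] ++ rleFrom x 1 xs := foldl_rleStep xs [] x 1
    simpa [rleStep, rleCanon] using this

theorem foldl_emitStep (runs : List (String × Nat)) : ∀ (res : List String),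
    List.foldl emitStep res runs = res ++ runs.flatMap chunk := by
  induction runs with
  | nil => intro res; simp
  | cons p ps ih =>
    intro res
    simp only [List.foldl_cons, List.flatMap_cons]
    rw [ih]
    simp [emitStep, chunk]
    by_cases h : p.1 = "10" <;> simp [h]

theorem rleFrom_eq (xs : List String) : ∀ (x : String) (n : Nat),
    rleFrom x n xs = (x, n + countEq x xs) :: rleCanon (List.drop (countEq x xs) xs) := by
  induction xs with
  | nil => intro x n; simp [rleFrom, countEq, rleCanon]
  | cons y ys ih =>
    intro x n
    by_cases h : y = x
    · subst h
      rw [show rleFrom y n (y :: ys) = rleFrom y (n + 1) ys from by simp [rleFrom],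
        show countEq y (y :: ys) = countEq y ys + 1 from by simp [countEq], ih y (n + 1)]
      have harith : n + 1 + countEq y ys = n + (countEq y ys + 1) := by omega
      simp [List.drop_succ_cons, harith]
    · simp [rleFrom, countEq, h, rleCanon]

theorem countEq_ten (l : List String) : countEq "10" l = count10 l := by
  induction l with
  | nil => rfl
  | cons y ys ih => by_cases h : y = "10" <;> simp [countEq, count10, h, ih]

-- emitting a run of a non-'10' element x peels exactly one x per cons
theorem emit_canon_cons (x : String) (xs : List String) (hx : ¬ x = "10") :
    (rleCanon (x :: xs)).flatMap chunk = x :: (rleCanon xs).flatMap chunk := by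
  cases xs with
  | nil => simp [rleCanon, rleFrom, chunk, hx]
  | cons y ys =>
    by_cases h : y = x
    · subst h
      have h1 : rleCanon (y :: y :: ys) = rleFrom y 2 ys := by
        simp [rleCanon, rleFrom]
      have h2 : rleCanon (y :: ys) = rleFrom y 1 ys := rfl
      rw [h1, h2, rleFrom_eq ys y 2, rleFrom_eq ys y 1]
      simp only [List.flatMap_cons, chunk, if_neg hx]
      rw [show 2 + countEq y ys = (1 + countEq y ys) + 1 by omega]
      simp [List.replicate_succ]
    · have h1 : rleCanon (x :: y :: ys) = (x, 1) :: rleFrom y 1 ys := by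
        simp [rleCanon, rleFrom, h]
      rw [h1]
      simp [List.flatMap_cons, chunk, hx, rleCanon]

theorem after_process_eq_emit (l : List String) :
    after_process l = (rleCanon l).flatMap chunk := by
  match l with
  | [] => simp [after_process, rleCanon]
  | x :: xs =>
    by_cases h : x = "10"
    · subst h
      have hc : rleCanon ("10" :: xs) = ("10", 1 + countEq "10" xs) ::
          rleCanon (List.drop (countEq "10" xs) xs) := by
        simpa [rleCanon] using rleFrom_eq xs "10" 1
      have hnum : count10 ("10" :: xs) = countEq "10" xs + 1 := by
        simp [count10, countEq_ten]
      have hdrop : List.drop (count10 ("10" :: xs)) ("10" :: xs) =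
          List.drop (countEq "10" xs) xs := by
        rw [hnum]; simp
      rw [after_process, dif_pos rfl]
      show List.replicate (count10 ("10" :: xs) / 16) (tens 16) ++
          [tens (count10 ("10" :: xs) % 16)] ++
          after_process (List.drop (count10 ("10" :: xs)) ("10" :: xs)) = _
      rw [hdrop, after_process_eq_emit (List.drop (countEq "10" xs) xs), hc]
      simp only [List.flatMap_cons, chunk, hnum]
      rw [show countEq "10" xs + 1 = 1 + countEq "10" xs by omega]
      simp
    · rw [after_process, dif_neg h, after_process_eq_emit xs, emit_canon_cons x xs h]
  termination_by l.length
  decreasing_by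
  · simp
  · simp


-- ===== VERDICT (by name: the statement is the Claim_ definition above) =====
theorem after_process_spec : Claim_equal_after_process := by
  intro l _
  unfold Spec_after_process after_process_alt
  rw [foldl_rleStep_nil, foldl_emitStep, after_process_eq_emit]
  simp
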